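-- pv_equiv track=rewrite | github.com/azishabibi/252d-chess-agent-img2move | infer.py | fen_to_human
-- ===== SOURCE A (Python) =====
-- def fen_to_human(fen):
--     piece_names = {
--         'p': 'pawn', 'r': 'rook', 'n': 'knight',
--         'b': 'bishop','q': 'queen','k': 'king'
--     }
--
--     placement = fen.split()[0]
--     ranks = placement.split('/')
--     descriptions = []
--
--     for rank_index, rank in enumerate(ranks):
--         rank_number = 8 - rank_index
--         file = 0
--         for c in rank:
--             if c.isdigit():
--                 file += int(c)
--             else:
--                 color = 'White' if c.isupper() else 'Black'
--                 piece = piece_names[c.lower()]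
--                 file_letter = chr(ord('a') + file)
--                 square = f"{file_letter}{rank_number}"
--                 descriptions.append(f"{color} {piece} is at {square}")
--                 file += 1
--
--     return descriptions
-- ===== SOURCE B (Python) =====
-- def fen_to_human(fen):
--     piece_names = {
--         'p': 'pawn', 'r': 'rook', 'n': 'knight',
--         'b': 'bishop','q': 'queen','k': 'king'
--     }
--
--     def expand(rank):
--         # replace each digit d by d filler dots, so positions carry the file index
--         return ''.join('.' * int(c) if c.isdigit() else c for c in rank)
--
--     return [
--         f"{'White' if c.isupper() else 'Black'} {piece_names[c.lower()]} "
--         f"is at {chr(ord('a') + i)}{8 - rank_index}"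
--         for rank_index, rank in enumerate(fen.split()[0].split('/'))
--         for i, c in enumerate(expand(rank))
--         if c != '.'
--     ]
-- ===== Notes on version B (the rewrite author's own statement) =====
-- stated objective: alternative
-- what changed: B replaces A's per-rank running file counter with an expand-then-enumerate pass: each rank is first expanded to a string with every digit d replaced by d filler dots, then a nested list comprehension over enumerate of the expansion reads the file index directly from the position, skipping fillers.
import Mathlib
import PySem

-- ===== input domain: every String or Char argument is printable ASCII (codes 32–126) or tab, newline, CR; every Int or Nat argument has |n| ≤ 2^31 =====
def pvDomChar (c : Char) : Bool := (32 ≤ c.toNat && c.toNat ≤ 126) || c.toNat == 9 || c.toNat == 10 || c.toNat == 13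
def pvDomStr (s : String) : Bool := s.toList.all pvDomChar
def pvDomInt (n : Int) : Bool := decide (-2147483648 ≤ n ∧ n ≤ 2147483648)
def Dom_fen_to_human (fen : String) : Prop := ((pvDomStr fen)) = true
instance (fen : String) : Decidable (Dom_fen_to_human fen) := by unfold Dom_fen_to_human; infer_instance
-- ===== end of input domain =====

-- B replaces A's running file counter by an expand-then-enumerate pass (digits become filler
-- dots so the enumerate index is the file); same return value, objective: alternative.

-- shared helpers: the piece_names dict and the f-string, identical text in both Pythons
def pvPieceNames : PySem.Dict Char String :=
  (((((PySem.Dict.empty.insert 'p' "pawn").insert 'r' "rook").insert 'n' "knight").insert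
      'b' "bishop").insert 'q' "queen").insert 'k' "king"

-- f"{color} {piece} is at {file_letter}{rank_number}" (lookup failure = KeyError, excluded by Pre_)
def pvDesc (c : Char) (file : Int) (rankNumber : Int) : String :=
  String.mk ((if PySem.Chars.isupper c then "White" else "Black").toList
    ++ ' ' :: ((PySem.Dict.get? pvPieceNames (PySem.Chars.lowerChar c)).getD "").toList
    ++ " is at ".toList
    ++ Char.ofNat (97 + file.toNat) :: PySem.Int.toChars rankNumber)

-- ===== PORT A =====
def fen_to_human (fen : String) : List String :=
  match (PySem.Str.split₀ fen)[0]? with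
  | none => []  -- fen.split()[0] raises IndexError here; excluded by Pre_
  | some placement =>
    let ranks := (PySem.Str.split? placement "/").getD []
    (PySem.List.enumerate ranks).foldl (fun descriptions p =>
      let rank_number : Int := 8 - p.1
      (p.2.toList.foldl (fun (st : Int × List String) c =>
          if PySem.Chars.isdigit c then
            (st.1 + (PySem.Int.ofChars? [c]).getD 0, st.2)
          else
            (st.1 + 1, st.2 ++ [pvDesc c st.1 rank_number]))
        (0, descriptions)).2) []

-- ===== PORT B =====
-- ''.join('.' * int(c) if c.isdigit() else c for c in rank)
def pvExpand (cs : List Char) : List Char :=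
  (cs.map (fun c =>
    if PySem.Chars.isdigit c then
      List.replicate ((PySem.Int.ofChars? [c]).getD 0).toNat '.'
    else [c])).flatten

def fen_to_human_alt (fen : String) : List String :=
  match (PySem.Str.split₀ fen)[0]? with
  | none => []  -- same IndexError in B; excluded by Pre_
  | some placement =>
    ((PySem.List.enumerate ((PySem.Str.split? placement "/").getD [])).map (fun rp =>
      (PySem.List.enumerate (pvExpand rp.2.toList)).filterMap (fun ic =>
        if ic.2 = '.' then none
        else some (pvDesc ic.2 ic.1 (8 - rp.1))))).flatten

-- ===== PRECONDITION & SPEC =====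
-- Pre_ excludes exactly the inputs where A raises: no whitespace-separated token at all
-- (IndexError), or a character of some rank that is neither a digit nor a piece letter (KeyError).
def Pre_fen_to_human (fen : String) : Prop :=
  (PySem.Str.split₀ fen) ≠ [] ∧
  ((PySem.Str.split₀ fen)[0]?.all fun p =>
    ((PySem.Str.split? p "/").getD []).all fun rank =>
      rank.toList.all fun c =>
        PySem.Chars.isdigit c || "pnrbqkPNRBQK".toList.contains c) = true
instance (fen : String) : Decidable (Pre_fen_to_human fen) := by
  unfold Pre_fen_to_human; infer_instance

def pvWitness_fen_to_human : String := "rnbqk2r/pp3ppp/8/8/8/8/PP3PPP/RNBQK2R w KQkq - 0 1"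

def Spec_fen_to_human (fen : String) (out : List String) : Prop := out = fen_to_human_alt fen
instance (fen : String) (out : List String) : Decidable (Spec_fen_to_human fen out) := by unfold Spec_fen_to_human; infer_instance

-- ===== CLAIM (what is proved, stated in full; the proofs are below) =====
def Claim_equal_fen_to_human : Prop := ∀ (fen : String), Dom_fen_to_human fen → Pre_fen_to_human fen → Spec_fen_to_human fen (fen_to_human fen)

-- ===== LEMMAS AND PROOFS =====

theorem pvPre_ranks (fen : String) (h : Pre_fen_to_human fen) :
    ∀ p ∈ (PySem.Str.split₀ fen)[0]?,
    ∀ rank ∈ (PySem.Str.split? p "/").getD [], ∀ c ∈ rank.toList,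
    PySem.Chars.isdigit c = true ∨ c ∈ "pnrbqkPNRBQK".toList := by
  obtain ⟨-, h⟩ := h
  intro p hp rank hr c hc
  cases hopt : (PySem.Str.split₀ fen)[0]? with
  | none => rw [hopt] at hp; simp at hp
  | some q =>
    rw [hopt] at hp h
    simp at hp; subst hp
    simp [List.all_eq_true] at h
    rcases h rank hr c hc with h' | h'
    · exact Or.inl h'
    · right
      simp only [show ("pnrbqkPNRBQK".toList) = ['p','n','r','b','q','k','P','N','R','B','Q','K'] from rfl, List.mem_cons]
      tauto

theorem pvDigitVal_nonneg (c : Char) (h : PySem.Chars.isdigit c = true) :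
    0 ≤ (PySem.Int.ofChars? [c]).getD 0 := by
  unfold PySem.Chars.isdigit at h
  simp [Char.le_def, UInt32.le_iff_toNat_le] at h
  have hc : c = Char.ofNat c.toNat := (Char.ofNat_toNat c).symm
  obtain ⟨h1, h2⟩ := h
  interval_cases h3 : c.toNat <;> rw [hc] <;> decide

theorem pvLetter_ne_dot (c : Char) (h : c ∈ "pnrbqkPNRBQK".toList) : c ≠ '.' := by
  intro hc; subst hc; exact absurd h (by decide)

theorem pvFilterMap_replicate (rn : Int) (n : Nat) (i : Int) :
    (PySem.List.enumerate (List.replicate n '.') i).filterMap (fun ic =>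
      if ic.2 = '.' then none else some (pvDesc ic.2 ic.1 rn)) = [] := by
  induction n generalizing i with
  | zero => simp [PySem.List.enumerate_nil]
  | succ n ih => simp [List.replicate_succ, PySem.List.enumerate_cons, ih]

theorem pvRank_equiv (rn : Int) (cs : List Char)
    (hcs : ∀ c ∈ cs, PySem.Chars.isdigit c = true ∨ c ∈ "pnrbqkPNRBQK".toList) :
    ∀ (i : Int) (acc : List String),
    (cs.foldl (fun (st : Int × List String) c =>
        if PySem.Chars.isdigit c then
          (st.1 + (PySem.Int.ofChars? [c]).getD 0, st.2)
        else
          (st.1 + 1, st.2 ++ [pvDesc c st.1 rn])) (i, acc)).2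
    = acc ++ (PySem.List.enumerate (pvExpand cs) i).filterMap (fun ic =>
        if ic.2 = '.' then none else some (pvDesc ic.2 ic.1 rn)) := by
  induction cs with
  | nil => intro i acc; simp [pvExpand, PySem.List.enumerate_nil]
  | cons c cs ih =>
    intro i acc
    have hc := hcs c (List.mem_cons_self ..)
    have hcs' : ∀ x ∈ cs, PySem.Chars.isdigit x = true ∨ x ∈ "pnrbqkPNRBQK".toList :=
      fun x hx => hcs x (List.mem_cons_of_mem _ hx)
    by_cases hd : PySem.Chars.isdigit c = true
    · have hnn := pvDigitVal_nonneg c hd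
      rw [List.foldl_cons]
      simp only [hd, if_true]
      rw [ih hcs' _ acc]
      have hexp : pvExpand (c :: cs)
          = List.replicate ((PySem.Int.ofChars? [c]).getD 0).toNat '.' ++ pvExpand cs := by
        simp [pvExpand, hd]
      rw [hexp, PySem.List.enumerate_append, List.filterMap_append, pvFilterMap_replicate]
      have : (i + ((List.replicate ((PySem.Int.ofChars? [c]).getD 0).toNat '.').length : Int))
          = i + (PySem.Int.ofChars? [c]).getD 0 := by
        simp [List.length_replicate]; omega
      rw [this]; simp
    · have hmem : c ∈ "pnrbqkPNRBQK".toList := (hcs c (List.mem_cons_self ..)).resolve_left hd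
      have hne := pvLetter_ne_dot c hmem
      rw [List.foldl_cons]
      simp only [hd]
      rw [ih hcs' _ _]
      have hexp : pvExpand (c :: cs) = c :: pvExpand cs := by simp [pvExpand, hd]
      rw [hexp, PySem.List.enumerate_cons, List.filterMap_cons]
      simp [hne, List.append_assoc]

theorem pvOuter_equiv (ranks : List String)
    (h : ∀ rank ∈ ranks, ∀ c ∈ rank.toList,
        PySem.Chars.isdigit c = true ∨ c ∈ "pnrbqkPNRBQK".toList) :
    ∀ (s : Int) (acc : List String),
    (PySem.List.enumerate ranks s).foldl (fun descriptions p =>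
      (p.2.toList.foldl (fun (st : Int × List String) c =>
          if PySem.Chars.isdigit c then
            (st.1 + (PySem.Int.ofChars? [c]).getD 0, st.2)
          else
            (st.1 + 1, st.2 ++ [pvDesc c st.1 (8 - p.1)]))
        (0, descriptions)).2) acc
    = acc ++ ((PySem.List.enumerate ranks s).map (fun rp =>
        (PySem.List.enumerate (pvExpand rp.2.toList)).filterMap (fun ic =>
          if ic.2 = '.' then none
          else some (pvDesc ic.2 ic.1 (8 - rp.1))))).flatten := by
  induction ranks with
  | nil => intro s acc; simp [PySem.List.enumerate_nil]
  | cons r rs ih =>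
    intro s acc
    have hr := h r (List.mem_cons_self ..)
    have h' : ∀ rank ∈ rs, ∀ c ∈ rank.toList,
        PySem.Chars.isdigit c = true ∨ c ∈ "pnrbqkPNRBQK".toList :=
      fun rank hrk => h rank (List.mem_cons_of_mem _ hrk)
    rw [PySem.List.enumerate_cons]
    simp only [List.foldl_cons, List.map_cons, List.flatten_cons]
    rw [pvRank_equiv (8 - s) r.toList hr 0 acc, ih h', List.append_assoc]

-- ===== VERDICT (by name: the statement is the Claim_ definition above) =====
theorem fen_to_human_spec : Claim_equal_fen_to_human := by
  intro fen _ hpre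
  have hp := pvPre_ranks fen hpre
  unfold Spec_fen_to_human fen_to_human fen_to_human_alt
  cases hopt : (PySem.Str.split₀ fen)[0]? with
  | none => rfl
  | some placement =>
    have hranks := hp placement (by rw [hopt]; exact rfl)
    simpa using pvOuter_equiv ((PySem.Str.split? placement "/").getD []) hranks 0 []
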